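-- pv_equiv track=rewrite | github.com/andybell/AoC2018 | day2/aoc2.py | scanBox
-- ===== SOURCE A (Python) =====
-- from collections import Counter
--
-- def scanBox(boxid):
--
--     # calculate the letter counts in each box id
--     d = Counter(boxid)
--
--     # init values for counting double letters
--     two = 0
--     three = 0
--
--     for key, value in d.items():
--         if value == 2:
--             two = 1
--         if value == 3:
--             three = 1
--         else:
--             pass
--
--     return two, three
-- ===== SOURCE B (Python) =====
-- def scanBox(boxid):
--     # sort the id so equal letters are adjacent, then scan run lengths
--     two = 0
--     three = 0
--     run = 0
--     prev = None
--     for ch in sorted(boxid):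
--         if prev == ch:
--             run += 1
--         else:
--             if run == 2:
--                 two = 1
--             if run == 3:
--                 three = 1
--             run = 1
--             prev = ch
--     if run == 2:
--         two = 1
--     if run == 3:
--         three = 1
--     return two, three
-- ===== Notes on version B (the rewrite author's own statement) =====
-- stated objective: alternative
-- what changed: Replaced the Counter frequency table with sort-then-scan: sort the id so equal letters are adjacent and detect runs of length 2 or 3 in a single linear scan with a run-length accumulator.
import Mathlib
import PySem

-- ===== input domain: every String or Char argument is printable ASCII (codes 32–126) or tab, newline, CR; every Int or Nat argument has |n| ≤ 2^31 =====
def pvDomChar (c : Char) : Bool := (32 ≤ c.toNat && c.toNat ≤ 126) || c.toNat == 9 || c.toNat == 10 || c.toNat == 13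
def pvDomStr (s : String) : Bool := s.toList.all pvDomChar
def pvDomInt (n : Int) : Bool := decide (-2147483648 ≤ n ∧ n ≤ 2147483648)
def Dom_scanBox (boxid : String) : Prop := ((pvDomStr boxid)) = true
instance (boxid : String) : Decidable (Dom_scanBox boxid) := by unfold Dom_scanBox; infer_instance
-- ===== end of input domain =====

-- B drops the Counter table: it sorts the id and detects runs of length 2/3 in one linear scan (alternative algorithm).

-- ===== PORT A =====
-- d = Counter(boxid); two = three = 0; for key, value in d.items(): if value == 2: two = 1; if value == 3: three = 1
def scanBox (boxid : String) : Int × Int :=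
  let d := PySem.Dict.counter boxid.toList
  let res := d.items.foldl
    (fun (st : Int × Int) (kv : Char × Int) =>
      (if kv.2 == 2 then 1 else st.1, if kv.2 == 3 then 1 else st.2))
    ((0 : Int), (0 : Int))
  res

-- ===== PORT B =====
-- for ch in sorted(boxid): maintain (two, three, run, prev); flush the run on a new letter; flush once more at the end
def scanBoxStep (st : Int × Int × Int × Option Char) (ch : Char) : Int × Int × Int × Option Char :=
  match st with
  | (two, three, run, prev) =>
    if prev == some ch then (two, three, run + 1, prev)
    else ((if run == 2 then 1 else two), (if run == 3 then 1 else three), 1, some ch)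

def scanBox_alt (boxid : String) : Int × Int :=
  let st := (PySem.List.sorted boxid.toList (fun c => c) false).foldl scanBoxStep
    ((0 : Int), (0 : Int), (0 : Int), (none : Option Char))
  ((if st.2.2.1 == 2 then 1 else st.1), (if st.2.2.1 == 3 then 1 else st.2.1))

-- ===== PRECONDITION & SPEC =====
def Spec_scanBox (boxid : String) (out : Int × Int) : Prop := out = scanBox_alt boxid
instance (boxid : String) (out : Int × Int) : Decidable (Spec_scanBox boxid out) := by unfold Spec_scanBox; infer_instance

-- ===== CLAIM (what is proved, stated in full; the proofs are below) =====
def Claim_equal_scanBox : Prop := ∀ (boxid : String), Dom_scanBox boxid → Spec_scanBox boxid (scanBox boxid)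

-- ===== LEMMAS AND PROOFS =====

-- 'if p(x): flag = 1' over a list sets the flag iff any element satisfies p
theorem foldl_set_one {α : Type} (p : α → Bool) (l : List α) (a : Int) :
    l.foldl (fun acc x => if p x then (1 : Int) else acc) a
      = if l.any p then 1 else a := by
  induction l generalizing a with
  | nil => simp
  | cons x t ih =>
    by_cases hx : p x = true
    · simp [List.foldl_cons, List.any_cons, hx, ih]
    · simp only [Bool.not_eq_true] at hx
      simp [List.foldl_cons, List.any_cons, hx, ih]

-- a run of k copies of the current letter just increments the run counter
theorem scanBoxStep_replicate (k : Nat) (two three run : Int) (a : Char) (rest : List Char) :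
    (List.replicate k a ++ rest).foldl scanBoxStep (two, three, run, some a)
      = rest.foldl scanBoxStep (two, three, run + (k : Int), some a) := by
  induction k generalizing run with
  | zero => simp
  | succ n ih =>
    simp only [List.replicate_succ, List.cons_append, List.foldl_cons, scanBoxStep]
    simp only [BEq.rfl, if_pos]
    have h : run + 1 + (n : Int) = run + ((n + 1 : Nat) : Int) := by push_cast; ring
    rw [ih, h]

-- run-length scan over a sorted list = "some letter has count m" flags
theorem if_flag (X Y Z : Bool) (x : Int) :
    (if X || Y then (1 : Int) else if Z then 1 else x) = (if (Y || X) || Z then 1 else x) := by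
  cases X <;> cases Y <;> cases Z <;> simp

theorem scanBox_runScan (n : Nat) (l : List Char) (hn : l.length ≤ n) (hs : l.Pairwise (· ≤ ·))
    (two three r : Int) (p : Option Char) (hp : ∀ c ∈ l, p ≠ some c) :
    ((if (l.foldl scanBoxStep (two, three, r, p)).2.2.1 == 2 then (1 : Int)
        else (l.foldl scanBoxStep (two, three, r, p)).1),
     (if (l.foldl scanBoxStep (two, three, r, p)).2.2.1 == 3 then (1 : Int)
        else (l.foldl scanBoxStep (two, three, r, p)).2.1))
      = ((if (l.any fun c => ((l.count c : Int) == 2)) || (r == 2) then 1 else two),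
         (if (l.any fun c => ((l.count c : Int) == 3)) || (r == 3) then 1 else three)) := by
  induction n generalizing l two three r p with
  | zero =>
    have : l = [] := List.eq_nil_of_length_eq_zero (Nat.le_zero.mp hn)
    subst this
    simp
  | succ n ih =>
    match l with
    | [] => simp
    | a :: t =>
      -- split t into the run of a's and the rest
      set k := (t.takeWhile (fun c => c == a)).length with hk
      set rest := t.dropWhile (fun c => c == a) with hrest
      have htw : t.takeWhile (fun c => c == a) = List.replicate k a := by
        apply List.eq_replicate_of_mem
        intro b hb
        have := List.mem_takeWhile_imp hb
        exact eq_of_beq this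
      have ht : t = List.replicate k a ++ rest := by
        rw [← htw]
        exact (List.takeWhile_append_dropWhile (p := fun c => c == a) (l := t)).symm
      have hsub : rest.Sublist t := List.dropWhile_sublist _
      have hpw_t : t.Pairwise (· ≤ ·) := (List.pairwise_cons.mp hs).2
      have hle : ∀ x ∈ t, a ≤ x := (List.pairwise_cons.mp hs).1
      have hpw_rest : rest.Pairwise (· ≤ ·) := hpw_t.sublist hsub
      have hanotin : a ∉ rest := by
        intro hmem
        cases hrest' : rest with
        | nil => rw [hrest'] at hmem; exact absurd hmem (List.not_mem_nil)
        | cons b u =>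
          have h0 : t.dropWhile (fun c => c == a) ≠ [] := by rw [← hrest, hrest']; simp
          have hbne : (b == a) = false := by
            have hhd := List.head_dropWhile_not (p := fun c => c == a) (l := t) h0
            have h1 : t.dropWhile (fun c => c == a) = b :: u := by rw [← hrest, hrest']
            have he : (t.dropWhile (fun c => c == a)).head h0 = b := by simp [h1]
            rw [he] at hhd
            simpa using hhd
          have hab : a ≤ b := hle b (hsub.mem (by rw [hrest']; simp))
          have hba : b = a := by
            rw [hrest'] at hmem hpw_rest
            rcases List.mem_cons.mp hmem with h1 | h2
            · exact h1.symm
            · exact le_antisymm ((List.pairwise_cons.mp hpw_rest).1 a h2) hab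
          simp [hba] at hbne
      have hcount_a : (a :: t).count a = 1 + k := by
        rw [ht]
        simp [List.count_append, List.count_eq_zero.mpr hanotin]
        omega
      have hcount_rest : ∀ c ∈ rest, (a :: t).count c = rest.count c := by
        intro c hc
        have hca : c ≠ a := fun h => hanotin (h ▸ hc)
        rw [ht]
        simp [List.count_append, List.count_replicate, Ne.symm hca]
      have hmem_l : ∀ c, c ∈ a :: t ↔ c = a ∨ c ∈ rest := by
        intro c
        rw [ht]
        simp [List.mem_replicate]
        tauto
      have hany : ∀ m : Int,
          ((a :: t).any fun c => (((a :: t).count c : Int) == m))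
            = ((((1 + k : Nat) : Int) == m) || rest.any fun c => ((rest.count c : Int) == m)) := by
        intro m
        rw [Bool.eq_iff_iff]
        simp only [List.any_eq_true, Bool.or_eq_true, beq_iff_eq]
        constructor
        · rintro ⟨c, hc, hcm⟩
          rcases (hmem_l c).mp hc with hca | hcr
          · left; rw [hca, hcount_a] at hcm; exact_mod_cast hcm
          · right; exact ⟨c, hcr, by rw [hcount_rest c hcr] at hcm; exact hcm⟩
        · rintro (h1 | ⟨c, hcr, hcm⟩)
          · exact ⟨a, by simp, by rw [hcount_a]; exact_mod_cast h1⟩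
          · exact ⟨c, (hmem_l c).mpr (Or.inr hcr), by rw [hcount_rest c hcr]; exact hcm⟩
      -- run the fold: first a, then the replicate chunk, then rest
      have hpa : (p == some a) = false :=
        beq_eq_false_iff_ne.mpr (hp a (by simp))
      have hfold : (a :: t).foldl scanBoxStep (two, three, r, p)
          = rest.foldl scanBoxStep
              ((if r == 2 then 1 else two), (if r == 3 then 1 else three),
               1 + (k : Int), some a) := by
        rw [List.foldl_cons]
        simp only [scanBoxStep, hpa, Bool.false_eq_true, if_false]
        rw [ht, scanBoxStep_replicate]
      have hlen : rest.length ≤ n := by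
        have := List.Sublist.length_le hsub
        simp at hn
        omega
      have hrest_hp : ∀ c ∈ rest, (some a : Option Char) ≠ some c := by
        intro c hc h
        exact hanotin (by injection h with h'; rw [h']; exact hc)
      rw [hfold]
      rw [ih rest hlen hpw_rest _ _ _ _ hrest_hp]
      rw [hany 2, hany 3]
      have hcast : ∀ m : Int, (((1 + k : Nat) : Int) == m) = ((1 + (k : Int)) == m) := by
        intro m; rw [Bool.eq_iff_iff]; simp
      rw [hcast 2, hcast 3]
      rw [if_flag, if_flag]

-- ===== VERDICT (by name: the statement is the Claim_ definition above) =====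
theorem scanBox_spec : Claim_equal_scanBox := by
  intro boxid _
  unfold Spec_scanBox scanBox scanBox_alt
  dsimp only
  rw [PySem.Dict.items_counter]
  rw [PySem.List.foldl_prod_mk
        (f := fun acc (kv : Char × Int) => if kv.2 == 2 then (1 : Int) else acc)
        (g := fun acc (kv : Char × Int) => if kv.2 == 3 then (1 : Int) else acc)]
  rw [List.foldl_map, List.foldl_map]
  rw [foldl_set_one (fun k => ((boxid.toList.count k : Int) == 2)),
      foldl_set_one (fun k => ((boxid.toList.count k : Int) == 3))]
  have hpw : (PySem.List.sorted boxid.toList (fun c => c) false).Pairwise (· ≤ ·) := by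
    simpa using PySem.List.sorted_pairwise (xs := boxid.toList) (key := fun c => c)
  have hB := scanBox_runScan (PySem.List.sorted boxid.toList (fun c => c) false).length
    (PySem.List.sorted boxid.toList (fun c => c) false) le_rfl hpw
    0 0 0 none (by intro c _ h; simp at h)
  rw [hB]
  have hperm : (PySem.List.sorted boxid.toList (fun c => c) false).Perm boxid.toList :=
    PySem.List.sorted_perm _ _ _
  have hbridge : ∀ m : Int,
      ((PySem.Set.ofList boxid.toList).any fun c => ((boxid.toList.count c : Int) == m))
        = ((PySem.List.sorted boxid.toList (fun c => c) false).any
            fun c => (((PySem.List.sorted boxid.toList (fun c => c) false).count c : Int) == m)) := by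
    intro m
    rw [Bool.eq_iff_iff]
    simp only [List.any_eq_true, PySem.Set.mem_ofList, PySem.List.mem_sorted, beq_iff_eq]
    constructor
    · rintro ⟨c, hc, hm⟩
      exact ⟨c, hc, by rw [hperm.count_eq]; exact hm⟩
    · rintro ⟨c, hc, hm⟩
      exact ⟨c, hc, by rw [← hperm.count_eq]; exact hm⟩
  rw [hbridge 2, hbridge 3]
  norm_num
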